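-- pv_equiv track=rewrite | github.com/Iamkrmayank/Medical-Coding | app.py | detect_performed_cxr
-- ===== SOURCE A (Python) =====
-- CPT_MAP = {
--     # Imaging
--     "chest x-ray single view": {"code":"71045", "display":"Radiologic examination, chest; single view", "system":"http://www.ama-assn.org/go/cpt"},
--     "chest x-ray two views":  {"code":"71046", "display":"Radiologic examination, chest; 2 views",       "system":"http://www.ama-assn.org/go/cpt"},
--
--     # Office/EM defaults (we populate separately but leave here for reference)
--     "em_99213": {"code":"99213","display":"Office/outpatient visit, established patient, low MDM","system":"http://www.ama-assn.org/go/cpt"},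
--
--     # Respiratory therapy
--     "nebulizer treatment": {"code":"94640","display":"Pressurized or nonpressurized inhalation treatment for acute airway obstruction","system":"http://www.ama-assn.org/go/cpt"},
--
--     # Injections (generic placeholder; in real systems you'd pick precise admin codes)
--     "therapeutic injection": {"code":"96372","display":"Therapeutic, prophylactic, or diagnostic injection; subcutaneous or intramuscular","system":"http://www.ama-assn.org/go/cpt"},
-- }
--
-- PERFORMED_HINTS = [
--     "performed", "done", "completed", "administered", "given", "provided", "carried out",
--     "obtained", "obtained in clinic", "obtained today"
-- ]
--
-- def near(text: str, a: str, b: str, window: int = 30) -> bool: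
--     """Return True if term b appears within +/-window chars of term a (rough heuristic)."""
--     low = text.lower()
--     a_idx = low.find(a.lower())
--     if a_idx == -1:
--         return False
--     start = max(0, a_idx - window)
--     end   = min(len(low), a_idx + len(a) + window)
--     return b.lower() in low[start:end]
--
-- def detect_performed_cxr(note: str):
--     """Detect CHEST X-RAY performed; decide CPT (single vs two views) based on language."""
--     low = note.lower()
--     # only if presence of performed hints near 'x-ray'
--     if "x-ray" in low or "xray" in low or "cxr" in low:
--         if any(near(low, "x-ray", h, 40) or near(low, "xray", h, 40) or near(low, "cxr", h, 40) for h in PERFORMED_HINTS):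
--             # crude rules for views
--             if "two views" in low or "2 views" in low or "pa and lateral" in low:
--                 return CPT_MAP["chest x-ray two views"]
--             return CPT_MAP["chest x-ray single view"]
--     return None
-- ===== SOURCE B (Python) =====
-- CPT_MAP = {
--     "chest x-ray single view": {"code":"71045", "display":"Radiologic examination, chest; single view", "system":"http://www.ama-assn.org/go/cpt"},
--     "chest x-ray two views":  {"code":"71046", "display":"Radiologic examination, chest; 2 views",       "system":"http://www.ama-assn.org/go/cpt"},
--     "em_99213": {"code":"99213","display":"Office/outpatient visit, established patient, low MDM","system":"http://www.ama-assn.org/go/cpt"},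
--     "nebulizer treatment": {"code":"94640","display":"Pressurized or nonpressurized inhalation treatment for acute airway obstruction","system":"http://www.ama-assn.org/go/cpt"},
--     "therapeutic injection": {"code":"96372","display":"Therapeutic, prophylactic, or diagnostic injection; subcutaneous or intramuscular","system":"http://www.ama-assn.org/go/cpt"},
-- }
--
-- PERFORMED_HINTS = [
--     "performed", "done", "completed", "administered", "given", "provided", "carried out",
--     "obtained", "obtained in clinic", "obtained today"
-- ]
--
-- def detect_performed_cxr(note: str):
--     """Detect CHEST X-RAY performed; decide CPT (single vs two views) based on language."""
--     low = note.lower()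
--     if "x-ray" not in low and "xray" not in low and "cxr" not in low:
--         return None
--     # build the +/-40-char context window around the FIRST occurrence of each spelling
--     windows = []
--     for term in ("x-ray", "xray", "cxr"):
--         idx = low.find(term)
--         if idx != -1:
--             windows.append(low[max(0, idx - 40):min(len(low), idx + len(term) + 40)])
--     if any(hint in w for w in windows for hint in PERFORMED_HINTS):
--         key = ("chest x-ray two views"
--                if "two views" in low or "2 views" in low or "pa and lateral" in low
--                else "chest x-ray single view")
--         return CPT_MAP[key]
--     return None
-- ===== Notes on version B (the rewrite author's own statement) =====
-- stated objective: simpler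
-- what changed: Replaces the 30 per-hint `near` rescans of the note with three context windows built once (first occurrence of each x-ray spelling), then a single pass testing every hint against those windows.
import Mathlib
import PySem

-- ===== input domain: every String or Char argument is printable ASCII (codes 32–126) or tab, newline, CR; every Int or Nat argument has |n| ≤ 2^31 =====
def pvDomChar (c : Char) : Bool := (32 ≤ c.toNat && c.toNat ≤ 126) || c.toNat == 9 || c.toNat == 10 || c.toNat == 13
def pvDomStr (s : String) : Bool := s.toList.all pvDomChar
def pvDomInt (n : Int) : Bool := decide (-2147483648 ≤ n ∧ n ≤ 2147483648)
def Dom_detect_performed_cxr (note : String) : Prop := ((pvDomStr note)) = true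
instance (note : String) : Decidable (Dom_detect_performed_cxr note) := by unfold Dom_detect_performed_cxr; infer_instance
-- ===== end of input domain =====

-- B replaces the per-hint `near` rescans with three first-occurrence context windows built
-- once, then a single pass of the hints over those windows (simpler decomposition, same result).


-- ===== PORT A =====
-- module constant CPT_MAP (values are dicts → association lists)
def cptMap : PySem.Dict String (List (String × String)) := PySem.Dict.ofList [
  ("chest x-ray single view", [("code","71045"),("display","Radiologic examination, chest; single view"),("system","http://www.ama-assn.org/go/cpt")]),
  ("chest x-ray two views",  [("code","71046"),("display","Radiologic examination, chest; 2 views"),("system","http://www.ama-assn.org/go/cpt")]),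
  ("em_99213", [("code","99213"),("display","Office/outpatient visit, established patient, low MDM"),("system","http://www.ama-assn.org/go/cpt")]),
  ("nebulizer treatment", [("code","94640"),("display","Pressurized or nonpressurized inhalation treatment for acute airway obstruction"),("system","http://www.ama-assn.org/go/cpt")]),
  ("therapeutic injection", [("code","96372"),("display","Therapeutic, prophylactic, or diagnostic injection; subcutaneous or intramuscular"),("system","http://www.ama-assn.org/go/cpt")])]

def performedHints : List String := ["performed", "done", "completed", "administered", "given", "provided", "carried out", "obtained", "obtained in clinic", "obtained today"]

-- helper `near` of A, step for step
def near (text a b : String) (window : Int) : Bool :=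
  let low := PySem.Str.lower text
  let aIdx := PySem.Str.find low (PySem.Str.lower a)
  if aIdx = -1 then false
  else
    let start := max 0 (aIdx - window)
    let stop  := min (PySem.Str.len low) (aIdx + PySem.Str.len a + window)
    PySem.Str.isIn (PySem.Str.lower b) (PySem.Str.slice low (some start) (some stop))

def detect_performed_cxr (note : String) : Option (List (String × String)) :=
  let low := PySem.Str.lower note
  if PySem.Str.isIn "x-ray" low || PySem.Str.isIn "xray" low || PySem.Str.isIn "cxr" low then
    if performedHints.any (fun h => near low "x-ray" h 40 || near low "xray" h 40 || near low "cxr" h 40) then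
      if PySem.Str.isIn "two views" low || PySem.Str.isIn "2 views" low || PySem.Str.isIn "pa and lateral" low then
        cptMap.get? "chest x-ray two views"      -- CPT_MAP["chest x-ray two views"]: key present, lookup yields the dict
      else cptMap.get? "chest x-ray single view"
    else none
  else none

-- ===== PORT B =====
-- B's window builder: the ±40-char context around the FIRST occurrence of term, if any
def windowOf (low term : String) : Option String :=
  let idx := PySem.Str.find low term
  if idx = -1 then none
  else some (PySem.Str.slice low (some (max 0 (idx - 40))) (some (min (PySem.Str.len low) (idx + PySem.Str.len term + 40))))

def detect_performed_cxr_alt (note : String) : Option (List (String × String)) :=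
  let low := PySem.Str.lower note
  if !(PySem.Str.isIn "x-ray" low) && !(PySem.Str.isIn "xray" low) && !(PySem.Str.isIn "cxr" low) then none
  else
    let windows := ["x-ray", "xray", "cxr"].filterMap (windowOf low)
    if windows.any (fun w => performedHints.any (fun h => PySem.Str.isIn h w)) then
      let key := if PySem.Str.isIn "two views" low || PySem.Str.isIn "2 views" low || PySem.Str.isIn "pa and lateral" low
                 then "chest x-ray two views" else "chest x-ray single view"
      cptMap.get? key
    else none

-- ===== PRECONDITION & SPEC =====
def Spec_detect_performed_cxr (note : String) (out : Option (List (String × String))) : Prop := out = detect_performed_cxr_alt note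
instance (note : String) (out : Option (List (String × String))) : Decidable (Spec_detect_performed_cxr note out) := by unfold Spec_detect_performed_cxr; infer_instance

-- ===== CLAIM (what is proved, stated in full; the proofs are below) =====
def Claim_equal_detect_performed_cxr : Prop := ∀ (note : String), Dom_detect_performed_cxr note → Spec_detect_performed_cxr note (detect_performed_cxr note)

-- ===== LEMMAS AND PROOFS =====

lemma char_le_toNat {a b : Char} : a ≤ b ↔ a.toNat ≤ b.toNat := by
  rw [Char.le_def, UInt32.le_iff_toNat_le]; rfl

lemma lowerChar_idem (c : Char) :
    PySem.Chars.lowerChar (PySem.Chars.lowerChar c) = PySem.Chars.lowerChar c := by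
  simp only [PySem.Chars.lowerChar, PySem.Chars.isupper]
  split_ifs with h1 h2
  · exfalso
    simp only [Bool.and_eq_true, decide_eq_true_eq, char_le_toNat,
      show ('A').toNat = 65 from rfl, show ('Z').toNat = 90 from rfl] at h1 h2
    have hv : (c.toNat + 32).isValidChar := Or.inl (by omega)
    rw [Char.toNat_ofNat, if_pos hv] at h2
    omega
  · rfl
  · rfl

lemma lower_idem (s : String) : PySem.Str.lower (PySem.Str.lower s) = PySem.Str.lower s := by
  have key : (PySem.Str.lower (PySem.Str.lower s)).toList = (PySem.Str.lower s).toList := by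
    simp only [PySem.Str.toList_lower, PySem.Chars.lower, List.map_map]
    exact List.map_congr_left (fun c _ => lowerChar_idem c)
  exact String.toList_inj.mp key

lemma any_or {α : Type} (l : List α) (p q : α → Bool) :
    l.any (fun x => p x || q x) = (l.any p || l.any q) := by
  induction l with
  | nil => simp
  | cons a t ih =>
    simp only [List.any_cons, ih]
    cases p a <;> cases q a <;> simp

lemma any_congr_mem {α : Type} {l : List α} {p q : α → Bool}
    (h : ∀ x ∈ l, p x = q x) : l.any p = l.any q := by
  induction l with
  | nil => rfl
  | cons a t ih =>
    simp only [List.any_cons, h a (List.mem_cons_self), ih (fun x hx => h x (List.mem_cons_of_mem a hx))]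

-- near over an already-lowered text, for a lowercase literal term, is the window test of B
lemma near_eq_windowOf (low t h : String)
    (hlow : PySem.Str.lower low = low) (ht : PySem.Str.lower t = t) :
    near low t h 40 =
      ((windowOf low t).map (fun w => PySem.Str.isIn (PySem.Str.lower h) w)).getD false := by
  simp only [near, windowOf, hlow, ht]
  by_cases hf : PySem.Chars.find low.toList t.toList = -1 <;> simp [hf]

lemma hints_lower (w : String) :
    performedHints.any (fun h => PySem.Str.isIn (PySem.Str.lower h) w)
      = performedHints.any (fun h => PySem.Str.isIn h w) := by
  apply any_congr_mem
  intro h hh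
  have e : ∀ x ∈ performedHints, PySem.Str.lower x = x := by decide
  rw [e h hh]

lemma anyHints_near (low t : String)
    (hlow : PySem.Str.lower low = low) (ht : PySem.Str.lower t = t) :
    performedHints.any (fun h => near low t h 40)
      = ((windowOf low t).map (fun w => performedHints.any (fun h => PySem.Str.isIn h w))).getD false := by
  cases hwt : windowOf low t with
  | none =>
    simp only [Option.map_none, Option.getD_none, List.any_eq_false]
    intro h _
    rw [near_eq_windowOf low t h hlow ht, hwt]
    simp
  | some w =>
    simp only [Option.map_some, Option.getD_some]
    rw [← hints_lower w]
    apply any_congr_mem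
    intro h _
    rw [near_eq_windowOf low t h hlow ht, hwt]
    rfl

-- the core: A's triple-near any equals B's windows-then-hints any
lemma any_near_eq_windows (low : String) (hlow : PySem.Str.lower low = low) :
    performedHints.any (fun h => near low "x-ray" h 40 || near low "xray" h 40 || near low "cxr" h 40)
      = (["x-ray", "xray", "cxr"].filterMap (windowOf low)).any
          (fun w => performedHints.any (fun h => PySem.Str.isIn h w)) := by
  rw [any_or performedHints (fun h => near low "x-ray" h 40 || near low "xray" h 40) (fun h => near low "cxr" h 40),
      any_or performedHints (fun h => near low "x-ray" h 40) (fun h => near low "xray" h 40)]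
  rw [anyHints_near low "x-ray" hlow (by decide), anyHints_near low "xray" hlow (by decide),
      anyHints_near low "cxr" hlow (by decide)]
  cases h1 : windowOf low "x-ray" <;> cases h2 : windowOf low "xray" <;> cases h3 : windowOf low "cxr" <;>
    simp [h1, h2, h3, Bool.or_assoc]

-- ===== VERDICT (by name: the statement is the Claim_ definition above) =====
theorem detect_performed_cxr_spec : Claim_equal_detect_performed_cxr := by
  intro note _
  unfold Spec_detect_performed_cxr
  simp only [detect_performed_cxr, detect_performed_cxr_alt]
  generalize hG : PySem.Str.lower note = low
  have hlow : PySem.Str.lower low = low := by rw [← hG]; exact lower_idem note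
  rw [any_near_eq_windows low hlow]
  by_cases hp : (PySem.Str.isIn "x-ray" low || PySem.Str.isIn "xray" low || PySem.Str.isIn "cxr" low) = true
  · have hg : ¬ ((!PySem.Str.isIn "x-ray" low && !PySem.Str.isIn "xray" low && !PySem.Str.isIn "cxr" low) = true) := by
      rw [← Bool.not_or, ← Bool.not_or, hp]; simp
    rw [if_pos hp, if_neg hg]
    by_cases hw : ((["x-ray", "xray", "cxr"].filterMap (windowOf low)).any
        (fun w => performedHints.any (fun h => PySem.Str.isIn h w))) = true
    · rw [if_pos hw, if_pos hw]
      by_cases hv : (PySem.Str.isIn "two views" low || PySem.Str.isIn "2 views" low ||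
          PySem.Str.isIn "pa and lateral" low) = true
      · rw [if_pos hv, if_pos hv]
      · rw [if_neg hv, if_neg hv]
    · rw [if_neg hw, if_neg hw]
  · have hp' : (PySem.Str.isIn "x-ray" low || PySem.Str.isIn "xray" low || PySem.Str.isIn "cxr" low) = false := by
      simpa using hp
    have hg : (!PySem.Str.isIn "x-ray" low && !PySem.Str.isIn "xray" low && !PySem.Str.isIn "cxr" low) = true := by
      rw [← Bool.not_or, ← Bool.not_or, hp']; rfl
    rw [if_neg hp, if_pos hg]
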